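/- GENERATED by c/gen_decode.py: decode facts of the image, one per distinct instruction byte string. -/
import UserX.DecodeImage

#decode_all Vorbis.Dec
  "0f28de"  -- movaps xmm3,xmm6
  "0f8477020000"  -- je 10d8a5
  "0f851a010000"  -- jne 113b98
  "0f894bfeffff"  -- jns 10f70a
  "0f8fbc000000"  -- jg 107a54
  "0fb6d8"  -- movzx ebx,al
  "39ca"  -- cmp edx,ecx
  "410fb64500"  -- movzx eax,BYTE PTR [r13+0x0]
  "4169f53c060000"  -- imul esi,r13d,0x63c
  "41892e"  -- mov DWORD PTR [r14],ebp
  "418b8424e4060000"  -- mov eax,DWORD PTR [r12+0x6e4]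
  "41c7860400c00004f204f2"  -- mov DWORD PTR [r14+0xc00004],0xf204f204
  "440faffb"  -- imul r15d,ebx
  "4439f3"  -- cmp ebx,r14d
  "4489742440"  -- mov DWORD PTR [rsp+0x40],r14d
  "4489ff"  -- mov edi,r15d
  "448bb380000000"  -- mov r14d,DWORD PTR [rbx+0x80]
  "4539fe"  -- cmp r14d,r15d
  "458b6c24f0"  -- mov r13d,DWORD PTR [r12-0x10]
  "48035d28"  -- add rbx,QWORD PTR [rbp+0x28]
  "486395a0000000"  -- movsxd rdx,DWORD PTR [rbp+0xa0]
  "4883c008"  -- add rax,0x8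
  "48894598"  -- mov QWORD PTR [rbp-0x68],rax
  "4889f5"  -- mov rbp,rsi
  "488b7c2408"  -- mov rdi,QWORD PTR [rsp+0x8]
  "488d3c9d00061200"  -- lea rdi,[rbx*4+0x120600]
  "488d7bc4"  -- lea rdi,[rbx-0x3c]
  "488d9c05e4010000"  -- lea rbx,[rbp+rax*1+0x1e4]
  "488dbc45b4000000"  -- lea rdi,[rbp+rax*2+0xb4]
  "48c1e304"  -- shl rbx,0x4
  "49030424"  -- add rax,QWORD PTR [r12]
  "49837d0000"  -- cmp QWORD PTR [r13+0x0],0x0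
  "498b7628"  -- mov rsi,QWORD PTR [r14+0x28]
  "498d7e19"  -- lea rdi,[r14+0x19]
  "49c1ee03"  -- shr r14,0x3
  "4ac784f4a000000000000000"  -- mov QWORD PTR [rsp+r14*8+0xa0],0x0
  "4c63eb"  -- movsxd r13,ebx
  "4c89f9"  -- mov rcx,r15
  "4c8d2c18"  -- lea r13,[rax+rbx*1]
  "4d39fd"  -- cmp r13,r15
  "4d8db424b6000000"  -- lea r14,[r12+0xb6]
  "660f2fe0"  -- comisd xmm4,xmm0
  "66410f7eee"  -- movd r14d,xmm5
  "7210"  -- jb 104bd5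
  "7440"  -- je 113b15
  "7537"  -- jne 108373
  "7a02"  -- jp 102cdc
  "7e69"  -- jle 1022a2
  "80bc24a300000068"  -- cmp BYTE PTR [rsp+0xa3],0x68
  "83c201"  -- add edx,0x1
  "89442418"  -- mov DWORD PTR [rsp+0x18],eax
  "898570ffffff"  -- mov DWORD PTR [rbp-0x90],eax
  "8b442404"  -- mov eax,DWORD PTR [rsp+0x4]
  "8b742410"  -- mov esi,DWORD PTR [rsp+0x10]
  "8d1c8500000000"  -- lea ebx,[rax*4+0x0]
  "bd01000000"  -- mov ebp,0x1
  "c644247c00"  -- mov BYTE PTR [rsp+0x7c],0x0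
  "c7838800000001000000"  -- mov DWORD PTR [rbx+0x88],0x1
  "e80377ffff"  -- call 10d1c0
  "e80d3effff"  -- call 100720
  "e8176affff"  -- call 100640
  "e82036ffff"  -- call 100300
  "e82a6cffff"  -- call 10d1c0
  "e832f8ffff"  -- call 100200
  "e83e64ffff"  -- call 103d00
  "e848aefeff"  -- call 1003c0
  "e85370ffff"  -- call 100720
  "e85f8dffff"  -- call 100640
  "e86c3fffff"  -- call 100720
  "e87770feff"  -- call 1008e0
  "e88284ffff"  -- call 100720
  "e88dabffff"  -- call 100640
  "e896effeff"  -- call 103d00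
  "e8a0efffff"  -- call 109120
  "e8abd8feff"  -- call 103d00
  "e8b4b2feff"  -- call 100560
  "e8bf72ffff"  -- call 100720
  "e8c992ffff"  -- call 10d040
  "e8d3fcfeff"  -- call 103d00
  "e8dee0ffff"  -- call 10d5c0
  "e8e791ffff"  -- call 10d040
  "e8ef7fffff"  -- call 10d1c0
  "e8f9feffff"  -- call 104c60
  "e922010000"  -- jmp 109adb
  "e968ffffff"  -- jmp 104a15
  "e9bef3ffff"  -- jmp 10eeba
  "eb14"  -- jmp 10154c
  "eba6"  -- jmp 1098eb
  "f20f1005b1dc0100"  -- movsd xmm0,QWORD PTR [rip+0x1dcb1]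
  "f20f5905c6470100"  -- mulsd xmm0,QWORD PTR [rip+0x147c6]
  "f20f5ec1"  -- divsd xmm0,xmm1
  "f30f105c241c"  -- movss xmm3,DWORD PTR [rsp+0x1c]
  "f30f1113"  -- movss DWORD PTR [rbx],xmm2
  "f30f115c2414"  -- movss DWORD PTR [rsp+0x14],xmm3
  "f30f5803"  -- addss xmm0,DWORD PTR [rbx]
  "f30f594524"  -- mulss xmm0,DWORD PTR [rbp+0x24]
  "f30f5cc3"  -- subss xmm0,xmm3
  "f3410f107d0c"  -- movss xmm7,DWORD PTR [r13+0xc]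
  "f7fe"  -- idiv esi
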